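-- pv_equiv track=rewrite | github.com/blkdev02/UTAx-CSE1309x | uta week 6.py | _instructor_function
-- ===== SOURCE A (Python) =====
-- def _instructor_function (s1,s2):
--     s1=s1.lower()
--     s2=s2.lower()
--     if s1==s2:
--         return 0
--     if abs(len(s1)-len(s2))!=1:
--         return 2
--
--     if len(s1)>len(s2):
--         # only deletion is possible
--         for k in range(len(s2)):
--             if s1[k]!=s2[k]:
--                 if s1[k+1:]==s2[k:]:
--                     return 1
--                 else:
--                     return 2
--         return 1
--     else: # s1 is shorter Only insertion is possible
--         for k in range(len(s1)):
--             if s1[k]!=s2[k]: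
--                 if s1[k:]==s2[k+1:]:
--                     return 1
--                 else:
--                     return 2
--         return 1
-- ===== SOURCE B (Python) =====
-- def _instructor_function(s1, s2):
--     a = s1.lower()
--     b = s2.lower()
--     if a == b:
--         return 0
--     if abs(len(a) - len(b)) != 1:
--         return 2
--     m = min(len(a), len(b))
--     p = 0
--     while p < m and a[p] == b[p]:
--         p += 1
--     q = 0
--     while q < m and a[len(a) - 1 - q] == b[len(b) - 1 - q]:
--         q += 1
--     return 1 if p + q >= m else 2
-- ===== Notes on version B (the rewrite author's own statement) =====
-- stated objective: alternative
-- what changed: A branches on which string is longer and runs a one-sided front scan that compares a suffix slice at the first mismatch; B is symmetric: it computes the longest common prefix and longest common suffix lengths and returns 1 iff p+q >= min(len), with no length-order branch and no slice comparison.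
import Mathlib
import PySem

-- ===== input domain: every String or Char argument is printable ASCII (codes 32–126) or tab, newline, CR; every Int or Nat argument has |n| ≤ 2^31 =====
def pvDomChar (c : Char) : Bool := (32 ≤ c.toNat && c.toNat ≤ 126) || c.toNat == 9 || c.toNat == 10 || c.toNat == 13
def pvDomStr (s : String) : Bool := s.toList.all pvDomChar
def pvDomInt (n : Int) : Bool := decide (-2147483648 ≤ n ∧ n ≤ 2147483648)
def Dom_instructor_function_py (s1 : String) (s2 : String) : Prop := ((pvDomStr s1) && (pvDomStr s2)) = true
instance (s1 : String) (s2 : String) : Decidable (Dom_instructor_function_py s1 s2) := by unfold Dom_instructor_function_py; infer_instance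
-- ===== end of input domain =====

-- B replaces A's length-ordered front scan + suffix-slice test by a symmetric
-- prefix/suffix match-length computation (return 1 iff p+q >= min len); same cost, no length-order branch.

-- ===== PORT A =====
-- A's deletion loop (s1 longer): walk both strings from the front; at the first
-- mismatch compare s1[k+1:] with s2[k:] (here: the tails).
def pvLoopDel : List Char → List Char → Int
  | _, [] => 1
  | [], _ :: _ => 1  -- unreachable when len s1 = len s2 + 1
  | d :: xt, c :: yt => if d ≠ c then (if xt = c :: yt then 1 else 2) else pvLoopDel xt yt

-- A's insertion loop (s1 shorter): mirror image, compares s1[k:] with s2[k+1:].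
def pvLoopIns : List Char → List Char → Int
  | [], _ => 1
  | _ :: _, [] => 1  -- unreachable when len s2 = len s1 + 1
  | d :: xt, c :: yt => if d ≠ c then (if d :: xt = yt then 1 else 2) else pvLoopIns xt yt

def instructor_function_py (s1 : String) (s2 : String) : Int :=
  let a := (PySem.Str.lower s1).toList
  let b := (PySem.Str.lower s2).toList
  if a = b then 0
  else if ((a.length : Int) - (b.length : Int)).natAbs ≠ 1 then 2
  else if a.length > b.length then pvLoopDel a b
  else pvLoopIns a b

-- ===== PORT B =====
-- length of the longest common prefix (B's front while-loop; the suffix loop is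
-- the same scan on the reversed strings)
def pvLcp : List Char → List Char → Nat
  | d :: xs, c :: ys => if d = c then pvLcp xs ys + 1 else 0
  | _, _ => 0

def instructor_function_py_alt (s1 : String) (s2 : String) : Int :=
  let a := (PySem.Str.lower s1).toList
  let b := (PySem.Str.lower s2).toList
  if a = b then 0
  else if ((a.length : Int) - (b.length : Int)).natAbs ≠ 1 then 2
  else
    let m := min a.length b.length
    let p := pvLcp a b
    let q := pvLcp a.reverse b.reverse
    if m ≤ p + q then 1 else 2

-- ===== PRECONDITION & SPEC =====
def Spec_instructor_function_py (s1 : String) (s2 : String) (out : Int) : Prop := out = instructor_function_py_alt s1 s2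
instance (s1 : String) (s2 : String) (out : Int) : Decidable (Spec_instructor_function_py s1 s2 out) := by unfold Spec_instructor_function_py; infer_instance

-- ===== CLAIM (what is proved, stated in full; the proofs are below) =====
def Claim_equal_instructor_function_py : Prop := ∀ (s1 : String) (s2 : String), Dom_instructor_function_py s1 s2 → Spec_instructor_function_py s1 s2 (instructor_function_py s1 s2)

-- ===== LEMMAS AND PROOFS =====

theorem pvLcp_nil_right (x : List Char) : pvLcp x [] = 0 := by cases x <;> rfl

theorem pvLcp_le (x y : List Char) : pvLcp x y ≤ min x.length y.length := by
  induction x generalizing y with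
  | nil => simp [pvLcp]
  | cons d xt ih =>
    cases y with
    | nil => simp [pvLcp]
    | cons c yt =>
      simp only [pvLcp, List.length_cons]
      split
      · have := ih yt; omega
      · omega

theorem pvLcp_comm (x y : List Char) : pvLcp x y = pvLcp y x := by
  induction x generalizing y with
  | nil => cases y <;> rfl
  | cons d xt ih =>
    cases y with
    | nil => rfl
    | cons c yt =>
      simp only [pvLcp]
      by_cases h : d = c
      · subst h; simp [ih]
      · have h' : ¬ c = d := fun hh => h hh.symm
        simp [h, h']

theorem take_pvLcp (x y : List Char) : x.take (pvLcp x y) = y.take (pvLcp x y) := by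
  induction x generalizing y with
  | nil => simp [pvLcp]
  | cons d xt ih =>
    cases y with
    | nil => simp [pvLcp_nil_right]
    | cons c yt =>
      simp only [pvLcp]
      by_cases h : d = c
      · subst h; simp [ih]
      · simp [h]

theorem le_pvLcp_of_take_eq (x y : List Char) (n : ℕ) (hx : n ≤ x.length) (hy : n ≤ y.length)
    (h : x.take n = y.take n) : n ≤ pvLcp x y := by
  induction x generalizing y n with
  | nil => simp at hx; omega
  | cons d xt ih =>
    cases y with
    | nil => simp at hy; omega
    | cons c yt =>
      cases n with
      | zero => omega
      | succ m =>
        simp only [List.take_succ_cons, List.cons.injEq] at h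
        simp only [pvLcp, h.1, if_pos]
        have := ih yt m (by simpa using hx) (by simpa using hy) h.2
        omega

theorem pvLcp_ge_iff (x y : List Char) (n : ℕ) (hx : n ≤ x.length) (hy : n ≤ y.length) :
    n ≤ pvLcp x y ↔ x.take n = y.take n := by
  constructor
  · intro h
    have := take_pvLcp x y
    calc x.take n = (x.take (pvLcp x y)).take n := by rw [List.take_take, Nat.min_eq_left h]
      _ = (y.take (pvLcp x y)).take n := by rw [this]
      _ = y.take n := by rw [List.take_take, Nat.min_eq_left h]
  · exact le_pvLcp_of_take_eq x y n hx hy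

-- equal suffixes of length n ↔ the reversed strings share a prefix of length n
theorem suffix_eq_iff (x y : List Char) (n : ℕ) (hx : n ≤ x.length) (hy : n ≤ y.length) :
    x.drop (x.length - n) = y.drop (y.length - n) ↔ n ≤ pvLcp x.reverse y.reverse := by
  rw [pvLcp_ge_iff x.reverse y.reverse n (by simpa using hx) (by simpa using hy)]
  constructor
  · intro h
    have : (x.drop (x.length - n)).reverse = (y.drop (y.length - n)).reverse := by rw [h]
    rw [List.reverse_drop, List.reverse_drop] at this
    rwa [Nat.sub_sub_self hx, Nat.sub_sub_self hy] at this
  · intro h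
    have : (x.drop (x.length - n)).reverse = (y.drop (y.length - n)).reverse := by
      rw [List.reverse_drop, List.reverse_drop, Nat.sub_sub_self hx, Nat.sub_sub_self hy]
      exact h
    exact List.reverse_injective this

theorem pvLoopDel_eq (x y : List Char) (h : x.length = y.length + 1) :
    pvLoopDel x y =
      if (pvLcp x y = y.length ∨ x.drop (pvLcp x y + 1) = y.drop (pvLcp x y)) then 1 else 2 := by
  induction y generalizing x with
  | nil => cases x <;> simp_all [pvLoopDel, pvLcp_nil_right]
  | cons c yt ih =>
    cases x with
    | nil => simp at h
    | cons d xt =>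
      by_cases hdc : d = c
      · subst hdc
        simp only [pvLoopDel, ne_eq, not_true_eq_false, if_false, pvLcp, if_true]
        rw [ih xt (by simpa using h)]
        simp only [List.length_cons, List.drop_succ_cons]
        congr 1
        simp only [eq_iff_iff]
        constructor
        · rintro (h1 | h2)
          · left; omega
          · right; exact h2
        · rintro (h1 | h2)
          · left; omega
          · right; exact h2
      · simp only [pvLoopDel, ne_eq, hdc, not_false_eq_true, if_true, pvLcp]
        simp only [List.drop_succ_cons]
        have : ¬ (0 = (c :: yt).length) := by simp
        by_cases he : xt = c :: yt <;> simp [he]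

theorem pvLoopIns_eq_del (x y : List Char) : pvLoopIns x y = pvLoopDel y x := by
  induction x generalizing y with
  | nil => cases y <;> rfl
  | cons d xt ih =>
    cases y with
    | nil => rfl
    | cons c yt =>
      simp only [pvLoopIns, pvLoopDel]
      by_cases h : d = c
      · subst h; simp [ih]
      · have h' : ¬ c = d := fun hh => h hh.symm
        simp only [ne_eq, h, h', not_false_eq_true, if_true]
        by_cases he : d :: xt = yt
        · simp [he]
        · have : ¬ yt = d :: xt := fun hh => he hh.symm
          simp [he, this]

-- A's mismatch-and-slice criterion agrees with B's p + q ≥ min criterion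
theorem crit_iff (x y : List Char) (h : x.length = y.length + 1) :
    (pvLcp x y = y.length ∨ x.drop (pvLcp x y + 1) = y.drop (pvLcp x y)) ↔
      y.length ≤ pvLcp x y + pvLcp x.reverse y.reverse := by
  have hle := pvLcp_le x y
  set p := pvLcp x y with hp
  rcases Nat.lt_or_ge p y.length with hlt | hge
  · have hxe : x.length - (y.length - p) = p + 1 := by omega
    have hye : y.length - (y.length - p) = p := by omega
    have := suffix_eq_iff x y (y.length - p) (by omega) (by omega)
    rw [hxe, hye] at this
    constructor
    · rintro (h1 | h2)
      · omega
      · have := this.mp h2; omega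
    · intro hq
      right
      exact this.mpr (by omega)
  · have hpe : p = y.length := by omega
    constructor
    · intro _; omega
    · intro _; left; exact hpe

theorem main_lists (a b : List Char) (hd : ((a.length : Int) - (b.length : Int)).natAbs = 1) :
    (if a.length > b.length then pvLoopDel a b else pvLoopIns a b) =
      (if min a.length b.length ≤ pvLcp a b + pvLcp a.reverse b.reverse then 1 else 2) := by
  rcases Nat.lt_or_ge b.length a.length with hgt | hge
  · have hlen : a.length = b.length + 1 := by omega
    rw [if_pos hgt, pvLoopDel_eq a b hlen]
    have hmin : min a.length b.length = b.length := by omega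
    rw [hmin]
    have hiff := crit_iff a b hlen
    by_cases hP : b.length ≤ pvLcp a b + pvLcp a.reverse b.reverse
    · rw [if_pos (hiff.mpr hP), if_pos hP]
    · rw [if_neg (fun hh => hP (hiff.mp hh)), if_neg hP]
  · have hlen : b.length = a.length + 1 := by omega
    rw [if_neg (by omega), pvLoopIns_eq_del a b, pvLoopDel_eq b a hlen]
    have hmin : min a.length b.length = a.length := by omega
    rw [hmin]
    rw [pvLcp_comm a b, pvLcp_comm a.reverse b.reverse]
    have hiff := crit_iff b a hlen
    by_cases hP : a.length ≤ pvLcp b a + pvLcp b.reverse a.reverse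
    · rw [if_pos (hiff.mpr hP), if_pos hP]
    · rw [if_neg (fun hh => hP (hiff.mp hh)), if_neg hP]

-- ===== VERDICT (by name: the statement is the Claim_ definition above) =====
theorem instructor_function_py_spec : Claim_equal_instructor_function_py := by
  intro s1 s2 _
  unfold Spec_instructor_function_py instructor_function_py instructor_function_py_alt
  set a := (PySem.Str.lower s1).toList
  set b := (PySem.Str.lower s2).toList
  by_cases h1 : a = b
  · simp [h1]
  · by_cases h2 : ((a.length : Int) - (b.length : Int)).natAbs ≠ 1
    · simp [h1, h2]
    · simp only [ne_eq, not_not] at h2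
      simp only [h1, if_false, h2, ne_eq, not_true_eq_false, if_false]
      exact main_lists a b h2
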